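-- pv_equiv track=rewrite | github.com/guillaumethomas/bike | bike_pattern.py | add_km_dict
-- ===== SOURCE A (Python) =====
-- def add_km_dict(year, km):
--     ''' '''
--     for month in year:
--         if year[month] <= 4:
--             year[month] = km[0]
--         elif year[month] <= 9:
--             year[month] = km[1]
--         elif year[month] <= 12:
--             year[month] = km[2]
--     return year
-- ===== SOURCE B (Python) =====
-- def add_km_dict(year, km):
--     """Three staged passes, one per bucket: snapshot the original values,
--     then for each bucket assign its km value to every month whose original
--     value falls in that bucket.  Mutates `year` in place and returns it."""
--     orig = dict(year)
--     bounds = [(None, 4), (4, 9), (9, 12)]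
--     for i, (lo, hi) in enumerate(bounds):
--         for month, v in orig.items():
--             if (lo is None or lo < v) and v <= hi:
--                 year[month] = km[i]
--     return year
-- ===== Notes on version B (the rewrite author's own statement) =====
-- stated objective: alternative
-- what changed: Instead of one pass over the months with a three-way if/elif ladder per value, B snapshots the original values and makes three staged passes, one per bucket (<=4, 4..9, 9..12), each pass assigning that bucket's km value to every matching month; values above 12 are never touched.
import Mathlib
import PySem

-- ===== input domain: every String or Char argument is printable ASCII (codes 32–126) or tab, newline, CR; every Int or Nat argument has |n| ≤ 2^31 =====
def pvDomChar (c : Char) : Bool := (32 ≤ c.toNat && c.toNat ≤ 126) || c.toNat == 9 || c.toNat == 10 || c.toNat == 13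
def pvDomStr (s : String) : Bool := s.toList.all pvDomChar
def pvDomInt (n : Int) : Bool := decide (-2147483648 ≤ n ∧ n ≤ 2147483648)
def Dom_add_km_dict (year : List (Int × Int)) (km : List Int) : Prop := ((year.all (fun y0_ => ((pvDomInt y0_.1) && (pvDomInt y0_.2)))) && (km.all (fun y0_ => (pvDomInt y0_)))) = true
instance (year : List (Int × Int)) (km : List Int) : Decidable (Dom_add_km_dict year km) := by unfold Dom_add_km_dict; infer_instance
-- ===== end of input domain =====

-- B replaces A's single pass with a per-value if/elif ladder by three staged passes,
-- one per bucket, over a snapshot of the original values (alternative decomposition,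
-- same cost). Both A and B mutate the dict `year` in place and return it; the
-- equivalence proved here is about the returned value.

-- ===== PORT A =====
-- one iteration of A's loop body: `if year[month] <= 4: … elif … elif …`
def addKmStepA (km : List Int) (d : PySem.Dict Int Int) (month : Int) : PySem.Dict Int Int :=
  match d.get? month with
  | none => d            -- KeyError: unreachable, `month` ranges over d's keys
  | some v =>
    if v ≤ 4 then
      match PySem.List.pyGet? km 0 with
      | some x => d.insert month x
      | none => d        -- IndexError: excluded by Pre_
    else if v ≤ 9 then
      match PySem.List.pyGet? km 1 with
      | some x => d.insert month x
      | none => d        -- IndexError: excluded by Pre_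
    else if v ≤ 12 then
      match PySem.List.pyGet? km 2 with
      | some x => d.insert month x
      | none => d        -- IndexError: excluded by Pre_
    else d

def add_km_dict (year : List (Int × Int)) (km : List Int) : List (Int × Int) :=
  let d0 : PySem.Dict Int Int := PySem.Dict.mk year
  ((d0.keys).foldl (addKmStepA km) d0).items

-- ===== PORT B =====
-- B's guard `(lo is None or lo < v) and v <= hi`
def passCond (lo : Option Int) (hi : Int) (v : Int) : Bool :=
  (match lo with | none => true | some l => decide (l < v)) && decide (v ≤ hi)

-- one staged pass (the inner `for month, v in orig.items()` loop for bucket i)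
def addKmPassB (km : List Int) (i : Int) (lo : Option Int) (hi : Int)
    (orig : List (Int × Int)) (d : PySem.Dict Int Int) : PySem.Dict Int Int :=
  orig.foldl (fun d p =>
    if passCond lo hi p.2 then
      match PySem.List.pyGet? km i with
      | some x => d.insert p.1 x
      | none => d        -- IndexError: excluded by Pre_
    else d) d

def add_km_dict_alt (year : List (Int × Int)) (km : List Int) : List (Int × Int) :=
  let orig : PySem.Dict Int Int := PySem.Dict.mk year
  let bounds : List (Option Int × Int) := [(none, 4), (some 4, 9), (some 9, 12)]
  ((PySem.List.enumerate bounds).foldl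
    (fun d ib => addKmPassB km ib.1 ib.2.1 ib.2.2 orig.items d) (PySem.Dict.mk year)).items

-- ===== PRECONDITION & SPEC =====
-- Pre_ excludes (i) association lists with duplicate keys, which do not represent a Python dict,
-- and (ii) inputs where some value falls in a bucket whose km index is missing, on which A raises IndexError.
def Pre_add_km_dict (year : List (Int × Int)) (km : List Int) : Prop :=
  (year.map Prod.fst).Nodup ∧
  ∀ p ∈ year,
    (p.2 ≤ 4 → 0 < km.length) ∧
    (4 < p.2 → p.2 ≤ 9 → 1 < km.length) ∧
    (9 < p.2 → p.2 ≤ 12 → 2 < km.length)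
instance (year : List (Int × Int)) (km : List Int) : Decidable (Pre_add_km_dict year km) := by
  unfold Pre_add_km_dict; infer_instance

def pvWitness_add_km_dict : (List (Int × Int)) × List Int :=
  ([(1, 3), (2, 8), (3, 11), (4, 20)], [100, 200, 300])

def Spec_add_km_dict (year : List (Int × Int)) (km : List Int) (out : List (Int × Int)) : Prop := out = add_km_dict_alt year km
instance (year : List (Int × Int)) (km : List Int) (out : List (Int × Int)) : Decidable (Spec_add_km_dict year km out) := by unfold Spec_add_km_dict; infer_instance

-- ===== CLAIM (what is proved, stated in full; the proofs are below) =====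
def Claim_equal_add_km_dict : Prop := ∀ (year : List (Int × Int)) (km : List Int), Dom_add_km_dict year km → Pre_add_km_dict year km → Spec_add_km_dict year km (add_km_dict year km)

-- ===== LEMMAS AND PROOFS =====

-- `km[i] if present else keep t`
def kmOr (km : List Int) (i : Int) (t : Int) : Int :=
  match PySem.List.pyGet? km i with
  | some x => x
  | none => t

-- the value A's ladder leaves at a month whose current value is v
def stepVal (km : List Int) (v : Int) : Int :=
  if v ≤ 4 then kmOr km 0 v
  else if v ≤ 9 then kmOr km 1 v
  else if v ≤ 12 then kmOr km 2 v
  else v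

theorem kmOr_idem (km : List Int) (i : Int) (t : Int) :
    kmOr km i (kmOr km i t) = kmOr km i t := by
  unfold kmOr; cases PySem.List.pyGet? km i <;> rfl

-- invariant for A's fold over the key list
theorem foldA_items (km : List Int) (year : List (Int × Int))
    (hnd : (year.map Prod.fst).Nodup) :
    ∀ (ks : List Int) (H : Int × Int → Int) (d : PySem.Dict Int Int),
      ks.Nodup → (∀ k ∈ ks, k ∈ year.map Prod.fst) →
      d.items = year.map (fun p => (p.1, H p)) →
      (ks.foldl (addKmStepA km) d).items =
        year.map (fun p => (p.1, if p.1 ∈ ks then stepVal km (H p) else H p)) := by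
  intro ks
  induction ks with
  | nil => intro H d _ _ hd; simpa using hd
  | cons k ks' ih =>
    intro H d hnodup hsub hd
    obtain ⟨p₀, hp₀, hk⟩ : ∃ p₀ ∈ year, p₀.1 = k := by
      have := hsub k (List.mem_cons_self ..)
      simpa [List.mem_map] using this
    have hkeysnd : d.keys.Nodup := by
      simp only [PySem.Dict.keys, hd, List.map_map]
      simpa [Function.comp_def] using hnd
    have hget : d.get? k = some (H p₀) := by
      apply PySem.Dict.get?_of_mem_items d ?_ hkeysnd
      rw [hd]; subst hk; exact List.mem_map_of_mem hp₀
    have hcont : d.contains k = true := by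
      rw [PySem.Dict.contains_eq_isSome_get?, hget]; rfl
    have hinj := List.inj_on_of_nodup_map hnd
    -- items after one step
    have hstep : (addKmStepA km d k).items =
        year.map (fun q => (q.1, if q.1 = k then stepVal km (H q) else H q)) := by
      have hins : ∀ (x : Int), (d.insert k x).items =
          year.map (fun q => (q.1, if q.1 = k then x else H q)) := by
        intro x
        rw [PySem.Dict.items_insert_of_contains _ _ hcont, hd, List.map_map]
        apply List.map_congr_left
        intro q hq
        by_cases hqk : q.1 = k <;> simp [Function.comp_def, hqk]
      simp only [addKmStepA, hget]
      unfold stepVal kmOr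
      split_ifs with h1 h2 h3
      · cases hx : PySem.List.pyGet? km 0 with
        | some x =>
          rw [hins x]; apply List.map_congr_left; intro q hq
          by_cases hqk : q.1 = k
          · have : q = p₀ := hinj hq hp₀ (by rw [hqk, hk])
            subst this
            simp [hqk, hx, h1]
          · simp [hqk]
        | none =>
          rw [hd]; apply List.map_congr_left; intro q hq
          by_cases hqk : q.1 = k
          · have : q = p₀ := hinj hq hp₀ (by rw [hqk, hk])
            subst this
            simp [hqk, hx, h1]
          · simp [hqk]
      · cases hx : PySem.List.pyGet? km 1 with
        | some x =>
          rw [hins x]; apply List.map_congr_left; intro q hq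
          by_cases hqk : q.1 = k
          · have : q = p₀ := hinj hq hp₀ (by rw [hqk, hk])
            subst this
            simp [hqk, hx, h1, h2]
          · simp [hqk]
        | none =>
          rw [hd]; apply List.map_congr_left; intro q hq
          by_cases hqk : q.1 = k
          · have : q = p₀ := hinj hq hp₀ (by rw [hqk, hk])
            subst this
            simp [hqk, hx, h1, h2]
          · simp [hqk]
      · cases hx : PySem.List.pyGet? km 2 with
        | some x =>
          rw [hins x]; apply List.map_congr_left; intro q hq
          by_cases hqk : q.1 = k
          · have : q = p₀ := hinj hq hp₀ (by rw [hqk, hk])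
            subst this
            simp [hqk, hx, h1, h2, h3]
          · simp [hqk]
        | none =>
          rw [hd]; apply List.map_congr_left; intro q hq
          by_cases hqk : q.1 = k
          · have : q = p₀ := hinj hq hp₀ (by rw [hqk, hk])
            subst this
            simp [hqk, hx, h1, h2, h3]
          · simp [hqk]
      · rw [hd]; apply List.map_congr_left; intro q hq
        by_cases hqk : q.1 = k
        · have : q = p₀ := hinj hq hp₀ (by rw [hqk, hk])
          subst this
          simp [hqk, h1, h2, h3]
        · simp [hqk]
    -- apply the induction hypothesis to the stepped dictionary
    rw [List.foldl_cons,
        ih (fun q => if q.1 = k then stepVal km (H q) else H q) (addKmStepA km d k)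
          hnodup.of_cons (fun x hx => hsub x (List.mem_cons_of_mem _ hx)) hstep]
    apply List.map_congr_left
    intro q hq
    have hknotin : k ∉ ks' := (List.nodup_cons.mp hnodup).1
    by_cases hqk : q.1 = k
    · simp [hqk, hknotin]
    · by_cases hqin : q.1 ∈ ks' <;> simp [hqk, hqin]

-- invariant for one of B's staged passes
theorem passB_items (km : List Int) (i : Int) (lo : Option Int) (hi : Int)
    (year : List (Int × Int)) (hnd : (year.map Prod.fst).Nodup) :
    ∀ (ys : List (Int × Int)) (H : Int × Int → Int) (d : PySem.Dict Int Int),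
      (∀ p ∈ ys, p ∈ year) →
      d.items = year.map (fun p => (p.1, H p)) →
      (addKmPassB km i lo hi ys d).items =
        year.map (fun p => (p.1,
          if p ∈ ys ∧ passCond lo hi p.2 = true
          then kmOr km i (H p) else H p)) := by
  intro ys
  induction ys with
  | nil => intro H d _ hd; simpa [addKmPassB] using hd
  | cons p ys' ih =>
    intro H d hsub hd
    have hpy : p ∈ year := hsub p (List.mem_cons_self ..)
    have hinj := List.inj_on_of_nodup_map hnd
    have hcont : d.contains p.1 = true := by
      have : (p.1, H p) ∈ d.items := by rw [hd]; exact List.mem_map_of_mem hpy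
      rw [PySem.Dict.contains_eq_isSome_get?,
          PySem.Dict.get?_of_mem_items d this
            (by simp only [PySem.Dict.keys, hd, List.map_map]
                simpa [Function.comp_def] using hnd)]
      rfl
    -- one inner-loop step
    have hstep : ((fun d (q : Int × Int) =>
        if (passCond lo hi q.2) then
          match PySem.List.pyGet? km i with
          | some x => d.insert q.1 x
          | none => d
        else d) d p).items =
        year.map (fun q => (q.1,
          if q = p ∧ passCond lo hi q.2 = true
          then kmOr km i (H q) else H q)) := by
      dsimp only
      by_cases hc : passCond lo hi p.2 = true
      · rw [if_pos hc]
        cases hx : PySem.List.pyGet? km i with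
        | some x =>
          show (d.insert p.1 x).items = _
          rw [PySem.Dict.items_insert_of_contains _ _ hcont, hd, List.map_map]
          apply List.map_congr_left
          intro q hq
          by_cases hqp : q.1 = p.1
          · have hqe : q = p := hinj hq hpy hqp
            subst hqe
            simp [hqp, hc, kmOr, hx]
          · have : ¬ q = p := fun h => hqp (by rw [h])
            simp [Function.comp_def, hqp, this]
        | none =>
          show d.items = _
          rw [hd]; apply List.map_congr_left; intro q hq
          by_cases hqe : q = p
          · subst hqe; simp [hc, kmOr, hx]
          · simp [hqe]
      · rw [if_neg hc]
        show d.items = _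
        rw [hd]; apply List.map_congr_left; intro q hq
        by_cases hqe : q = p
        · subst hqe; simp [hc]
        · simp [hqe]
    have := ih (fun q => if q = p ∧ passCond lo hi q.2 = true then kmOr km i (H q) else H q)
      _ (fun x hx => hsub x (List.mem_cons_of_mem _ hx)) hstep
    unfold addKmPassB at this ⊢
    rw [List.foldl_cons, this]
    apply List.map_congr_left
    intro q hq
    by_cases hcq : passCond lo hi q.2 = true
    · by_cases hqe : q = p <;> by_cases hqin : q ∈ ys' <;>
        simp_all [kmOr_idem]
    · simp [hcq]

-- ===== VERDICT (by name: the statement is the Claim_ definition above) =====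
set_option maxHeartbeats 2000000 in
theorem add_km_dict_spec : Claim_equal_add_km_dict := by
  intro year km _ hpre
  obtain ⟨hnd, hlen⟩ := hpre
  unfold Spec_add_km_dict
  show (List.foldl (addKmStepA km) (PySem.Dict.mk year) (PySem.Dict.mk year).keys).items =
    (addKmPassB km 2 (some 9) 12 (PySem.Dict.mk year).items
      (addKmPassB km 1 (some 4) 9 (PySem.Dict.mk year).items
        (addKmPassB km 0 none 4 (PySem.Dict.mk year).items (PySem.Dict.mk year)))).items
  -- A's side
  have hd0 : (PySem.Dict.mk year).items = year.map (fun p => (p.1, p.2)) := by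
    simp [PySem.Dict.items]
  have hkeys : (PySem.Dict.mk year).keys = year.map Prod.fst := by
    simp [PySem.Dict.keys, PySem.Dict.items]
  have hA := foldA_items km year hnd (year.map Prod.fst) Prod.snd (PySem.Dict.mk year)
    hnd (fun k hk => hk) hd0
  rw [hkeys, hA]
  -- B's side: the three staged passes
  have horig : (PySem.Dict.mk year).items = year := rfl
  rw [horig]
  have h0 := passB_items km 0 none 4 year hnd year Prod.snd (PySem.Dict.mk year)
    (fun p hp => hp) hd0
  have h1 := passB_items km 1 (some 4) 9 year hnd year _ _ (fun p hp => hp) h0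
  have h2 := passB_items km 2 (some 9) 12 year hnd year _ _ (fun p hp => hp) h1
  rw [h2]
  apply List.map_congr_left
  intro p hp
  have hm : p.1 ∈ year.map Prod.fst := List.mem_map_of_mem hp
  cases hx0 : PySem.List.pyGet? km 0 <;> cases hx1 : PySem.List.pyGet? km 1 <;>
    cases hx2 : PySem.List.pyGet? km 2 <;>
      simp only [stepVal, passCond, kmOr, hx0, hx1, hx2, hp, hm, if_true, true_and,
        Bool.and_eq_true, decide_eq_true_eq] <;>
      split_ifs <;> simp_all <;> omega
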